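-- pv_equiv track=rewrite | github.com/21Max12/Web-Technologie | Tile_Quest/app/utils.py | wort_uebereinstimmung
-- ===== SOURCE A (Python) =====
-- def wort_uebereinstimmung(target_word, guess):
--     # Initialisierung der Ergebnisliste
--     ergebnis = []
--
--     # Um Dopplungen zu vermeiden, wird eine Kopie des Zielwortes erstellt, die bearbeitet wird
--     zielwort_kopie = list(target_word)
--
--     # Überprüfung jedes Buchstabens im eingegebenen Wort
--     for index, buchstabe in enumerate(guess):
--         if index < len(target_word) and buchstabe == target_word[index]:
--             # Richtiger Buchstabe an der richtigen Position
--             ergebnis.append(1)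
--             # Markieren des Buchstabens im Zielwort als "verwendet"
--             zielwort_kopie[index] = None
--         elif buchstabe in zielwort_kopie:
--             # Richtiger Buchstabe, aber an der falschen Position
--             ergebnis.append(2)
--             # Markieren des ersten Vorkommens des Buchstabens im Zielwort als "verwendet"
--             zielwort_kopie[zielwort_kopie.index(buchstabe)] = None
--         else:
--             # Falscher Buchstabe
--             ergebnis.append(3)
--
--     return ergebnis
-- ===== SOURCE B (Python) =====
-- def wort_uebereinstimmung(target_word, guess):
--     # Precompute, for each letter, its positions in the target (increasing).
--     # Greens mark their position used; a yellow takes the smallest still-unused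
--     # position of its letter via a per-letter pointer with lazy skipping.
--     positions = {}
--     for pos, ch in enumerate(target_word):
--         positions.setdefault(ch, []).append(pos)
--     ptr = {}
--     used = [False] * len(target_word)
--     n = len(target_word)
--     result = []
--     for i, ch in enumerate(guess):
--         if i < n and ch == target_word[i]:
--             result.append(1)
--             used[i] = True
--         elif ch in positions:
--             lst = positions[ch]
--             p = ptr.get(ch, 0)
--             while p < len(lst) and used[lst[p]]:
--                 p += 1
--             if p < len(lst):
--                 result.append(2)
--                 used[lst[p]] = True
--                 ptr[ch] = p + 1
--             else:
--                 ptr[ch] = p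
--                 result.append(3)
--         else:
--             result.append(3)
--     return result
-- ===== Notes on version B (the rewrite author's own statement) =====
-- stated objective: faster
-- what changed: A rescans and mutates a copy of the target for every guess letter ('in' + '.index' linear scans); B precomputes a per-letter table of target positions once and serves each yellow lookup with a monotone per-letter pointer that lazily skips positions already used by greens, removing the inner scans.
import Mathlib
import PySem

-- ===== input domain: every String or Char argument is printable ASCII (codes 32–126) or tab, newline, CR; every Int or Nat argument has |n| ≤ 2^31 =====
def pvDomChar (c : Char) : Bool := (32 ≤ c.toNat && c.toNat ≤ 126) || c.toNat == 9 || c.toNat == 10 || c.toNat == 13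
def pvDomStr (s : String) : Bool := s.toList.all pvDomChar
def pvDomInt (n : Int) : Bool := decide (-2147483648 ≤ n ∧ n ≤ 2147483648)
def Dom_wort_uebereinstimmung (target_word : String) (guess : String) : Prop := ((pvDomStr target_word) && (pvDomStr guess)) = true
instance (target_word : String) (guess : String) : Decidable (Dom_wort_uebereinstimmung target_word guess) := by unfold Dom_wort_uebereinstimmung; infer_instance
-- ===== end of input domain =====

-- B replaces A's per-letter linear scans of the mutable target copy by a precomputed
-- per-letter position table with monotone pointers (lazy skipping of used positions):
-- an alternative algorithm, O(n+m) amortised instead of O(n*m). Equivalence of the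
-- RETURN VALUE is proved (neither program mutates its arguments).

-- ===== PORT A =====
-- loop indices of Python's enumerate are nonnegative ints, rendered as Nat
def stepA (t : List Char) (st : List Int × List (Option Char)) (xi : Char × Nat) :
    List Int × List (Option Char) :=
  let (erg, kopie) := st
  if xi.2 < t.length ∧ t.getD xi.2 ' ' = xi.1 then
    (erg ++ [1], kopie.set xi.2 none)
  else if (some xi.1) ∈ kopie then
    -- `.index` cannot raise here: the membership test just succeeded
    (erg ++ [2], kopie.set ((PySem.List.index? kopie (some xi.1)).getD 0) none)
  else
    (erg ++ [3], kopie)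

def wort_uebereinstimmung (target_word : String) (guess : String) : List Int :=
  (guess.toList.zipIdx.foldl (stepA target_word.toList)
    ([], target_word.toList.map some)).1

-- ===== PORT B =====
-- positions.setdefault(ch, []).append(pos)  ==  modify ch [] (· ++ [pos])
def buildPositions (t : List Char) : PySem.Dict Char (List Nat) :=
  t.zipIdx.foldl (fun d p => d.modify p.1 [] (· ++ [p.2])) PySem.Dict.empty

-- the `while p < len(lst) and used[lst[p]]: p += 1` loop
def skipUsed (used : List Bool) (lst : List Nat) (p : Nat) : Nat :=
  if p < lst.length ∧ used.getD (lst.getD p 0) false = true then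
    skipUsed used lst (p + 1)
  else p
termination_by lst.length - p

def stepB (t : List Char) (pos : PySem.Dict Char (List Nat))
    (st : List Int × List Bool × PySem.Dict Char Nat) (xi : Char × Nat) :
    List Int × List Bool × PySem.Dict Char Nat :=
  let (result, used, ptr) := st
  if xi.2 < t.length ∧ t.getD xi.2 ' ' = xi.1 then
    (result ++ [1], used.set xi.2 true, ptr)
  else if pos.contains xi.1 then
    let lst := pos.getD xi.1 []
    let p := skipUsed used lst (ptr.getD xi.1 0)
    if p < lst.length then
      (result ++ [2], used.set (lst.getD p 0) true, ptr.insert xi.1 (p + 1))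
    else
      (result ++ [3], used, ptr.insert xi.1 p)
  else
    (result ++ [3], used, ptr)

def wort_uebereinstimmung_alt (target_word : String) (guess : String) : List Int :=
  (guess.toList.zipIdx.foldl (stepB target_word.toList (buildPositions target_word.toList))
    ([], List.replicate target_word.toList.length false, PySem.Dict.empty)).1

-- ===== PRECONDITION & SPEC =====
def Spec_wort_uebereinstimmung (target_word : String) (guess : String) (out : List Int) : Prop := out = wort_uebereinstimmung_alt target_word guess
instance (target_word : String) (guess : String) (out : List Int) : Decidable (Spec_wort_uebereinstimmung target_word guess out) := by unfold Spec_wort_uebereinstimmung; infer_instance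

-- ===== CLAIM (what is proved, stated in full; the proofs are below) =====
def Claim_equal_wort_uebereinstimmung : Prop := ∀ (target_word : String) (guess : String), Dom_wort_uebereinstimmung target_word guess → Spec_wort_uebereinstimmung target_word guess (wort_uebereinstimmung target_word guess)

-- ===== LEMMAS AND PROOFS =====

def occL (c : Char) (l : List (Char × Nat)) : List Nat :=
  (l.filter (fun p => p.1 == c)).map (·.2)

lemma occL_cons (c x : Char) (k : Nat) (l : List (Char × Nat)) :
    occL c ((x, k) :: l) = if x = c then k :: occL c l else occL c l := by
  by_cases h : x = c <;> simp [occL, h]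

lemma occL_mem (c : Char) (xs : List Char) (k p : Nat) (hp : p ∈ occL c (xs.zipIdx k)) :
    k ≤ p ∧ p < k + xs.length ∧ xs.getD (p - k) ' ' = c := by
  induction xs generalizing k with
  | nil => simp [occL] at hp
  | cons x xs ih =>
    rw [List.zipIdx_cons, occL_cons] at hp
    have step : p ∈ occL c (xs.zipIdx (k+1)) →
        k ≤ p ∧ p < k + (x :: xs).length ∧ (x :: xs).getD (p - k) ' ' = c := by
      intro h
      obtain ⟨h1, h2, h3⟩ := ih (k+1) h
      refine ⟨by omega, by simp; omega, ?_⟩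
      have : p - k = (p - (k+1)) + 1 := by omega
      rw [this]; simpa using h3
    by_cases hx : x = c
    · rw [if_pos hx] at hp
      rcases List.mem_cons.mp hp with h|h
      · subst h; simp [hx]
      · exact step h
    · rw [if_neg hx] at hp
      exact step hp

lemma occL_complete (c : Char) (xs : List Char) (k j : Nat) (hj : j < xs.length)
    (hc : xs.getD j ' ' = c) : (k + j) ∈ occL c (xs.zipIdx k) := by
  induction xs generalizing k j with
  | nil => simp at hj
  | cons x xs ih =>
    rw [List.zipIdx_cons, occL_cons]
    cases j with
    | zero =>
      simp only [List.getD_cons_zero] at hc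
      simp [hc]
    | succ j =>
      simp only [List.length_cons] at hj
      simp only [List.getD_cons_succ] at hc
      have := ih (k+1) j (by omega) hc
      have heq : k + (j + 1) = (k + 1) + j := by omega
      rw [heq]
      by_cases hx : x = c <;> simp [hx, this]

lemma occL_lb (c : Char) (xs : List Char) (k p : Nat) (hp : p ∈ occL c (xs.zipIdx k)) :
    k ≤ p := (occL_mem c xs k p hp).1

lemma occL_sorted (c : Char) (xs : List Char) (k : Nat) :
    (occL c (xs.zipIdx k)).Pairwise (· < ·) := by
  induction xs generalizing k with
  | nil => simp [occL]
  | cons x xs ih =>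
    rw [List.zipIdx_cons, occL_cons]
    by_cases hx : x = c
    · rw [if_pos hx]
      refine List.pairwise_cons.mpr ⟨?_, ih (k+1)⟩
      intro b hb
      have := occL_lb c xs (k+1) b hb
      omega
    · rw [if_neg hx]; exact ih (k+1)

def maskK (t : List Char) (used : List Bool) : List (Option Char) :=
  (List.range t.length).map (fun p => if used.getD p false then none else some (t.getD p ' '))

lemma length_maskK (t : List Char) (used : List Bool) : (maskK t used).length = t.length := by
  simp [maskK]

lemma getElem_maskK (t : List Char) (used : List Bool) (i : Nat) (h : i < t.length) :
    (maskK t used)[i]'(by rw [length_maskK]; exact h) =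
      if used.getD i false then none else some (t.getD i ' ') := by
  simp [maskK]

lemma getD_build (t : List Char) (c : Char) :
    (buildPositions t).getD c [] = occL c t.zipIdx := by
  rw [buildPositions, PySem.Dict.getD_foldl_modify_append]
  simp [occL, PySem.Dict.getD_empty]

lemma contains_build (t : List Char) (c : Char) (h : (buildPositions t).contains c = false) :
    occL c t.zipIdx = [] := by
  have main : ∀ (l : List (Char × Nat)) (d : PySem.Dict Char (List Nat)),
      (l.foldl (fun d p => d.modify p.1 [] (· ++ [p.2])) d).contains c =
        (d.contains c || l.any (fun p => p.1 == c)) := by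
    intro l
    induction l with
    | nil => simp
    | cons p l ih =>
      intro d
      simp only [List.foldl_cons, List.any_cons, ih, PySem.Dict.contains_modify]
      have hcomm : (c == p.1) = (p.1 == c) := by
        by_cases hc : c = p.1
        · simp [hc]
        · simp [hc, Ne.symm hc]
      rw [hcomm]
      cases p.1 == c <;> cases d.contains c <;> simp
  rw [buildPositions, main] at h
  rw [PySem.Dict.contains_empty] at h
  simp only [Bool.false_or, List.any_eq_false] at h
  simp only [occL]
  rw [List.filter_eq_nil_iff.mpr]
  · simp
  · intro p hp
    simpa using h p hp

lemma getD_set_bool (used : List Bool) (m i : Nat) (hm : m < used.length) :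
    (used.set m true).getD i false = (if i = m then true else used.getD i false) := by
  rcases eq_or_ne i m with h|h
  · simp [h, hm, List.getD_eq_getElem?_getD]
  · simp [List.getD_eq_getElem?_getD, Ne.symm h, h]

lemma getD_set_mono (used : List Bool) (m i : Nat) (h : used.getD i false = true) :
    (used.set m true).getD i false = true := by
  rcases eq_or_ne m i with h1|h1
  · subst h1
    have hlt : m < used.length := by
      by_contra hh
      rw [List.getD_eq_getElem?_getD, List.getElem?_eq_none (by omega)] at h
      simp at h
    simp [List.getD_eq_getElem?_getD, hlt]
  · simpa [List.getD_eq_getElem?_getD, h1, Ne.symm h1] using h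

lemma mask_init (t : List Char) :
    t.map some = maskK t (List.replicate t.length false) := by
  apply List.ext_getElem (by simp [maskK])
  intro i h1 h2
  simp only [List.length_map] at h1
  rw [getElem_maskK t _ i h1]
  simp [List.getD_eq_getElem?_getD, h1]

lemma mask_set (t : List Char) (used : List Bool) (m : Nat) (hm : m < t.length)
    (hlen : used.length = t.length) :
    (maskK t used).set m none = maskK t (used.set m true) := by
  apply List.ext_getElem (by simp [maskK])
  intro i h1 h2
  have hit : i < t.length := by simpa [maskK] using h2
  rw [List.getElem_set, getElem_maskK t used i hit,
    getElem_maskK t (used.set m true) i hit, getD_set_bool used m i (by omega)]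
  rcases eq_or_ne i m with h|h
  · simp [h]
  · simp [h, Ne.symm h]

lemma mem_mask (t : List Char) (used : List Bool) (c : Char) :
    (some c) ∈ maskK t used ↔
      ∃ p, p < t.length ∧ used.getD p false = false ∧ t.getD p ' ' = c := by
  rw [List.mem_iff_getElem]
  constructor
  · rintro ⟨i, hi, hv⟩
    rw [length_maskK] at hi
    rw [getElem_maskK t used i hi] at hv
    by_cases hu : used.getD i false
    · rw [if_pos hu] at hv; exact absurd hv (by simp)
    · rw [if_neg hu] at hv
      exact ⟨i, hi, by simpa using hu, by injection hv⟩
  · rintro ⟨p, hp, hu, hc⟩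
    refine ⟨p, by rw [length_maskK]; exact hp, ?_⟩
    rw [getElem_maskK t used p hp, hu, hc]
    simp

lemma index?_first {α : Type} [BEq α] [LawfulBEq α] (xs : List α) (v : α) (m : Nat)
    (h1 : xs[m]? = some v) (h2 : ∀ j, j < m → xs[j]? ≠ some v) :
    PySem.List.index? xs v = some m := by
  induction xs generalizing m with
  | nil => simp at h1
  | cons x xs ih =>
    cases m with
    | zero =>
      simp at h1
      rw [h1, PySem.List.index?_cons_self]
    | succ m =>
      have hx : x ≠ v := by
        intro hh
        exact h2 0 (by omega) (by simp [hh])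
      rw [PySem.List.index?_cons_of_ne xs hx, ih m (by simpa using h1)
        (fun j hj => by simpa using h2 (j+1) (by omega))]
      rfl

lemma index?_mask (t : List Char) (used : List Bool) (c : Char) (m : Nat)
    (hm : m < t.length) (hu : used.getD m false = false) (hc : t.getD m ' ' = c)
    (hmin : ∀ j, j < m → ¬(used.getD j false = false ∧ t.getD j ' ' = c)) :
    PySem.List.index? (maskK t used) (some c) = some m := by
  apply index?_first
  · rw [List.getElem?_eq_getElem (by rw [length_maskK]; exact hm),
      getElem_maskK t used m hm, hu, hc]
    simp
  · intro j hj hval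
    have hjt : j < t.length := by omega
    rw [List.getElem?_eq_getElem (by rw [length_maskK]; exact hjt),
      getElem_maskK t used j hjt] at hval
    by_cases hu2 : used.getD j false
    · rw [if_pos hu2] at hval; simp at hval
    · rw [if_neg hu2] at hval
      simp only [Option.some.injEq] at hval
      exact hmin j hj ⟨by simpa using hu2, hval⟩

lemma skipUsed_le (used : List Bool) (lst : List Nat) (p : Nat) (h : p ≤ lst.length) :
    skipUsed used lst p ≤ lst.length := by
  induction p using skipUsed.induct (used := used) (lst := lst) with
  | case1 p hc ih => rw [skipUsed, if_pos hc]; exact ih (by omega)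
  | case2 p hc => rw [skipUsed, if_neg hc]; exact h

lemma skipUsed_skipped (used : List Bool) (lst : List Nat) (p : Nat) :
    ∀ r, p ≤ r → r < skipUsed used lst p → used.getD (lst.getD r 0) false = true := by
  induction p using skipUsed.induct (used := used) (lst := lst) with
  | case1 p hc ih =>
    intro r h1 h2
    rcases eq_or_lt_of_le h1 with h|h
    · exact h ▸ hc.2
    · exact ih r h (by rwa [skipUsed, if_pos hc] at h2)
  | case2 p hc =>
    intro r h1 h2
    rw [skipUsed, if_neg hc] at h2
    omega

lemma skipUsed_stop (used : List Bool) (lst : List Nat) (p : Nat)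
    (h : skipUsed used lst p < lst.length) :
    used.getD (lst.getD (skipUsed used lst p) 0) false = false := by
  induction p using skipUsed.induct (used := used) (lst := lst) with
  | case1 p hc ih => rw [skipUsed, if_pos hc] at h ⊢; exact ih h
  | case2 p hc =>
    rw [skipUsed, if_neg hc] at h ⊢
    rw [not_and_or] at hc
    rcases hc with hc|hc
    · omega
    · simpa using hc

def PtrInv (t : List Char) (used : List Bool) (ptr : PySem.Dict Char Nat) : Prop :=
  ∀ c, ptr.getD c 0 ≤ (occL c t.zipIdx).length ∧
    ∀ r, r < ptr.getD c 0 → used.getD ((occL c t.zipIdx).getD r 0) false = true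

lemma loop_eq (t : List Char) :
    ∀ (gs : List Char) (k : Nat) (erg : List Int) (used : List Bool)
      (ptr : PySem.Dict Char Nat),
      used.length = t.length → PtrInv t used ptr →
      ((gs.zipIdx k).foldl (stepA t) (erg, maskK t used)).1 =
      ((gs.zipIdx k).foldl (stepB t (buildPositions t)) (erg, used, ptr)).1 := by
  intro gs
  induction gs with
  | nil => intro k erg used ptr _ _; rfl
  | cons x gs ih =>
    intro k erg used ptr hlen hinv
    rw [List.zipIdx_cons, List.foldl_cons, List.foldl_cons]
    by_cases hg : k < t.length ∧ t.getD k ' ' = x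
    · -- green
      have hA : stepA t (erg, maskK t used) (x, k) =
          (erg ++ [1], maskK t (used.set k true)) := by
        simp only [stepA]
        rw [if_pos hg, mask_set t used k hg.1 hlen]
      have hB : stepB t (buildPositions t) (erg, used, ptr) (x, k) =
          (erg ++ [1], used.set k true, ptr) := by
        simp only [stepB]
        rw [if_pos hg]
      rw [hA, hB]
      apply ih (k+1) (erg ++ [1]) (used.set k true) ptr (by simpa using hlen)
      intro c
      exact ⟨(hinv c).1, fun r hr => getD_set_mono _ _ _ ((hinv c).2 r hr)⟩
    · -- not green
      by_cases hcont : (buildPositions t).contains x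
      case neg =>
        -- letter absent from target: both append 3, no state change
        have hocc := contains_build t x (by simpa using hcont)
        have hmem : ¬ ((some x) ∈ maskK t used) := by
          rw [mem_mask]
          rintro ⟨p, hp, -, hc⟩
          have := occL_complete x t 0 p hp hc
          rw [hocc] at this
          simp at this
        have hA : stepA t (erg, maskK t used) (x, k) = (erg ++ [3], maskK t used) := by
          simp only [stepA]
          rw [if_neg hg, if_neg hmem]
        have hB : stepB t (buildPositions t) (erg, used, ptr) (x, k) =
            (erg ++ [3], used, ptr) := by
          simp only [stepB]
          rw [if_neg hg, if_neg (by simp [hcont])]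
        rw [hA, hB]
        exact ih (k+1) (erg ++ [3]) used ptr hlen hinv
      case pos =>
        set L := occL x t.zipIdx with hLdef
        have hL : (buildPositions t).getD x [] = L := getD_build t x
        set p0 := ptr.getD x 0 with hp0
        set q := skipUsed used L p0 with hq
        have hqle : q ≤ L.length := skipUsed_le used L p0 (hinv x).1
        have hsorted := occL_sorted x t 0
        have hmono : ∀ r s (hr : r < L.length) (hs : s < L.length), r < s →
            L[r] < L[s] := fun r s hr hs hrs =>
          (List.pairwise_iff_getElem.mp hsorted) r s hr hs hrs
        -- any position of x with index < q in L is used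
        have husedL : ∀ r, r < q → used.getD (L.getD r 0) false = true := by
          intro r hr
          by_cases hrp : r < p0
          · exact (hinv x).2 r hrp
          · exact skipUsed_skipped used L p0 r (by omega) hr
        by_cases hql : q < L.length
        case pos =>
          -- a free occurrence exists: both append 2, mark L[q]
          have hmq : L.getD q 0 = L[q] := List.getD_eq_getElem L 0 hql
          set m := L.getD q 0 with hmdef
          have hmmem : m ∈ L := by rw [hmq]; exact List.getElem_mem hql
          obtain ⟨-, hmlt, hmc⟩ := occL_mem x t 0 m hmmem
          simp only [Nat.zero_add, Nat.sub_zero] at hmlt hmc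
          have hmu : used.getD m false = false := skipUsed_stop used L p0 hql
          have hmem : (some x) ∈ maskK t used := (mem_mask t used x).mpr ⟨m, hmlt, hmu, hmc⟩
          have hmin : ∀ j, j < m → ¬(used.getD j false = false ∧ t.getD j ' ' = x) := by
            rintro j hj ⟨hju, hjc⟩
            have hjmem : j ∈ L := by
              simpa using occL_complete x t 0 j (by omega) hjc
            obtain ⟨r, hr, hrj⟩ := List.mem_iff_getElem.mp hjmem
            have e1 : m = L[q] := hmq
            have hrq : r < q := by
              rcases lt_trichotomy r q with h|h|h
              · exact h
              · exfalso; subst h; omega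
              · exfalso
                have hlt := hmono q r hql hr h
                omega
            have := husedL r hrq
            rw [List.getD_eq_getElem L 0 hr, hrj] at this
            rw [hju] at this; cases this
          have hidx : PySem.List.index? (maskK t used) (some x) = some m :=
            index?_mask t used x m hmlt hmu hmc hmin
          have hA : stepA t (erg, maskK t used) (x, k) =
              (erg ++ [2], maskK t (used.set m true)) := by
            simp only [stepA]
            rw [if_neg hg, if_pos hmem, hidx]
            rw [show (some m).getD 0 = m from rfl, mask_set t used m hmlt hlen]
          have hB : stepB t (buildPositions t) (erg, used, ptr) (x, k) =
              (erg ++ [2], used.set m true, ptr.insert x (q + 1)) := by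
            simp only [stepB]
            rw [if_neg hg, if_pos hcont, hL]
            rw [← hp0, ← hq, if_pos hql]
          rw [hA, hB]
          apply ih (k+1) (erg ++ [2]) (used.set m true) (ptr.insert x (q+1))
            (by simpa using hlen)
          intro c
          rcases eq_or_ne c x with hcx|hcx
          · subst hcx
            rw [PySem.Dict.getD_insert_self]
            refine ⟨by rw [← hLdef]; omega, ?_⟩
            intro r hr
            rcases eq_or_lt_of_le (Nat.le_of_lt_succ hr) with h|h
            · rw [h, ← hLdef, ← hmdef]
              rw [getD_set_bool used m m (by omega)]
              simp
            · rw [← hLdef]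
              exact getD_set_mono _ _ _ (husedL r h)
          · rw [PySem.Dict.getD_insert_of_ne (hne := hcx)]
            exact ⟨(hinv c).1, fun r hr => getD_set_mono _ _ _ ((hinv c).2 r hr)⟩
        case neg =>
          -- every occurrence is used: both append 3
          have hqeq : q = L.length := by omega
          have hmem : ¬ ((some x) ∈ maskK t used) := by
            rw [mem_mask]
            rintro ⟨p, hp, hpu, hpc⟩
            have hpmem : p ∈ L := by simpa using occL_complete x t 0 p hp hpc
            obtain ⟨r, hr, hrp⟩ := List.mem_iff_getElem.mp hpmem
            have := husedL r (by omega)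
            rw [List.getD_eq_getElem L 0 hr, hrp, hpu] at this
            cases this
          have hA : stepA t (erg, maskK t used) (x, k) = (erg ++ [3], maskK t used) := by
            simp only [stepA]
            rw [if_neg hg, if_neg hmem]
          have hB : stepB t (buildPositions t) (erg, used, ptr) (x, k) =
              (erg ++ [3], used, ptr.insert x q) := by
            simp only [stepB]
            rw [if_neg hg, if_pos hcont, hL, ← hp0, ← hq, if_neg hql]
          rw [hA, hB]
          apply ih (k+1) (erg ++ [3]) used (ptr.insert x q) hlen
          intro c
          rcases eq_or_ne c x with hcx|hcx
          · subst hcx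
            rw [PySem.Dict.getD_insert_self]
            exact ⟨by rw [← hLdef]; omega, fun r hr => by rw [← hLdef]; exact husedL r hr⟩
          · rw [PySem.Dict.getD_insert_of_ne (hne := hcx)]
            exact hinv c

-- ===== VERDICT (by name: the statement is the Claim_ definition above) =====
theorem wort_uebereinstimmung_spec : Claim_equal_wort_uebereinstimmung := by
  intro tw g _
  unfold Spec_wort_uebereinstimmung wort_uebereinstimmung wort_uebereinstimmung_alt
  rw [mask_init]
  exact loop_eq tw.toList g.toList 0 [] _ _ (by simp)
    (fun c => by simp [PySem.Dict.getD_empty])
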